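-- pv_equiv track=rewrite | github.com/Querolj/Handwritting-code | Histograme.py | scoringPart_matrice
-- ===== SOURCE A (Python) =====
-- def scoringPart_matrice(list, scoreCurve):
--         score = 0
--         for elt in range(len(list)-1):
--             score += (list[elt][1]-list[elt+1][1])
--         if scoreCurve == None:
--         	scoreCurve = []
--         scoreCurve.append(score)
--         return scoreCurve
-- ===== SOURCE B (Python) =====
-- def scoringPart_matrice(list, scoreCurve):
--     if scoreCurve is None:
--         scoreCurve = []
--     scoreCurve.append(list[0][1] - list[-1][1] if len(list) > 1 else 0)
--     return scoreCurve
-- ===== Notes on version B (the rewrite author's own statement) =====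
-- stated objective: simpler
-- what changed: A's loop summing adjacent differences list[i][1]-list[i+1][1] is replaced by the telescoped closed form list[0][1]-list[-1][1] (0 when fewer than two rows); no loop at all.
import Mathlib
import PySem

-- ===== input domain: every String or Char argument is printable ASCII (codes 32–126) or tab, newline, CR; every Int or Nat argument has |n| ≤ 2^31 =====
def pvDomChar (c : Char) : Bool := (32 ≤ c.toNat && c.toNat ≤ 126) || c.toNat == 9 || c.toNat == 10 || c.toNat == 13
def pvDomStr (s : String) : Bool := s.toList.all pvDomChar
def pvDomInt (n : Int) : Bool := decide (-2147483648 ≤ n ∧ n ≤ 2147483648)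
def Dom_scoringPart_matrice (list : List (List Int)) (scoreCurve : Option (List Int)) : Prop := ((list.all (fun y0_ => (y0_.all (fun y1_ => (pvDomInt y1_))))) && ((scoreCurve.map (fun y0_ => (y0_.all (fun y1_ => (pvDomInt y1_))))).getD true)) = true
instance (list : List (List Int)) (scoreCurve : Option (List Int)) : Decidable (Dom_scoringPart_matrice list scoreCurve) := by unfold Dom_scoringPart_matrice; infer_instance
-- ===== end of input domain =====

-- B replaces A's loop over adjacent differences by the telescoped closed form
-- list[0][1]-list[-1][1] (simpler: no loop); equivalence is about the RETURN value
-- (A appends to scoreCurve in place, and B performs the same in-place append).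

-- ===== PORT A =====
def scoringPart_matrice (list : List (List Int)) (scoreCurve : Option (List Int)) : List Int :=
  let score := (PySem.List.pyRange 0 ((list.length : Int) - 1) 1).foldl
    (fun score elt =>
      score + (PySem.List.pyGetD (PySem.List.pyGetD list elt []) 1 0
               - PySem.List.pyGetD (PySem.List.pyGetD list (elt + 1) []) 1 0)) 0
  let sc := match scoreCurve with
    | none => []
    | some l => l
  sc ++ [score]

-- ===== PORT B =====
def scoringPart_matrice_alt (list : List (List Int)) (scoreCurve : Option (List Int)) : List Int :=
  let sc := match scoreCurve with
    | none => []
    | some l => l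
  let score := if 1 < list.length then
      PySem.List.pyGetD (PySem.List.pyGetD list 0 []) 1 0
        - PySem.List.pyGetD (PySem.List.pyGetD list (-1) []) 1 0
    else 0
  sc ++ [score]

-- ===== PRECONDITION & SPEC =====
-- Pre_ excludes exactly the inputs on which Python A raises IndexError: with at least two rows,
-- every row must have at least two entries (A reads row[1] of every row).
def Pre_scoringPart_matrice (list : List (List Int)) (scoreCurve : Option (List Int)) : Prop :=
  list.length ≤ 1 ∨ ∀ row ∈ list, 2 ≤ row.length
instance (list : List (List Int)) (scoreCurve : Option (List Int)) : Decidable (Pre_scoringPart_matrice list scoreCurve) := by unfold Pre_scoringPart_matrice; infer_instance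

def pvWitness_scoringPart_matrice : List (List Int) × Option (List Int) := ([[1, 2], [3, 4]], none)

def Spec_scoringPart_matrice (list : List (List Int)) (scoreCurve : Option (List Int)) (out : List Int) : Prop := out = scoringPart_matrice_alt list scoreCurve
instance (list : List (List Int)) (scoreCurve : Option (List Int)) (out : List Int) : Decidable (Spec_scoringPart_matrice list scoreCurve out) := by unfold Spec_scoringPart_matrice; infer_instance

-- ===== CLAIM (what is proved, stated in full; the proofs are below) =====
def Claim_equal_scoringPart_matrice : Prop := ∀ (list : List (List Int)) (scoreCurve : Option (List Int)), Dom_scoringPart_matrice list scoreCurve → Pre_scoringPart_matrice list scoreCurve → Spec_scoringPart_matrice list scoreCurve (scoringPart_matrice list scoreCurve)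

-- ===== LEMMAS AND PROOFS =====

-- The sum of adjacent differences telescopes: for any f, the loop's fold over range(0, n) equals f 0 - f n.
theorem pv_telescope (f : Int → Int) (n : Nat) :
    (PySem.List.pyRange 0 (n : Int) 1).foldl (fun s i => s + (f i - f (i + 1))) 0
      = f 0 - f (n : Int) := by
  induction n with
  | zero => simp [PySem.List.pyRange_one_eq_nil]
  | succ n ih =>
    have h : ((n + 1 : Nat) : Int) = (n : Int) + 1 := by push_cast; ring
    rw [h, PySem.List.pyRange_one_succ_right (by positivity), List.foldl_append, ih]
    simp

theorem scoringPart_matrice_eq (list : List (List Int)) (scoreCurve : Option (List Int))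
    (_hpre : Pre_scoringPart_matrice list scoreCurve) :
    scoringPart_matrice list scoreCurve = scoringPart_matrice_alt list scoreCurve := by
  unfold scoringPart_matrice scoringPart_matrice_alt
  rcases Nat.eq_zero_or_pos list.length with h0 | hpos
  · -- empty list: empty range, score 0 on both sides
    simp [h0, PySem.List.pyRange_one_eq_nil]
  · have hcast : ((list.length : Int) - 1) = ((list.length - 1 : Nat) : Int) := by
      omega
    rw [hcast, pv_telescope (fun i => PySem.List.pyGetD (PySem.List.pyGetD list i []) 1 0)]
    by_cases h2 : 1 < list.length
    · simp only [if_pos h2]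
      congr 2
      · -- list[len-1] = list[-1]
        rw [PySem.List.pyGetD_neg_ofNat list 1 [] (by omega) (by omega),
            PySem.List.pyGetD_natCast, List.getD_eq_getElem _ _ (by omega)]
    · -- exactly one row: f 0 - f 0 = 0
      have h1 : list.length = 1 := by omega
      simp [h1]

-- ===== VERDICT (by name: the statement is the Claim_ definition above) =====
theorem scoringPart_matrice_spec : Claim_equal_scoringPart_matrice := by
  intro list scoreCurve _ hpre
  exact scoringPart_matrice_eq list scoreCurve hpre
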